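-- pv_equiv track=rewrite | github.com/prometheuslucas/PythonProjects | pythonTests/main.py | get_odd_streaks
-- ===== SOURCE A (Python) =====
-- def get_odd_streaks(numbers):
--     streaks = []
--     current_streak = 0
--     for number in numbers:
--         if number % 2 == 1:
--             current_streak += 1
--         else:
--             if current_streak > 0:
--                 streaks.append(current_streak)
--                 current_streak = 0
--     if current_streak > 0:
--         streaks.append(current_streak)
--     return max(streaks) if streaks else 0
-- ===== SOURCE B (Python) =====
-- def get_odd_streaks(numbers):
--     best = 0
--     i = 0
--     n = len(numbers)
--     while i < n:
--         if numbers[i] % 2 == 1: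
--             j = i
--             while j < n and numbers[j] % 2 == 1:
--                 j += 1
--             best = max(best, j - i)
--             i = j
--         else:
--             i += 1
--     return best
-- ===== Notes on version B (the rewrite author's own statement) =====
-- stated objective: alternative
-- what changed: Replaces A's streak-counter state machine (accumulating a list of streak lengths and taking max at the end) with a run-scanning loop: for each maximal run of consecutive odds it computes the run length directly and keeps a running maximum, never materialising a list of streaks.
import Mathlib
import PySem

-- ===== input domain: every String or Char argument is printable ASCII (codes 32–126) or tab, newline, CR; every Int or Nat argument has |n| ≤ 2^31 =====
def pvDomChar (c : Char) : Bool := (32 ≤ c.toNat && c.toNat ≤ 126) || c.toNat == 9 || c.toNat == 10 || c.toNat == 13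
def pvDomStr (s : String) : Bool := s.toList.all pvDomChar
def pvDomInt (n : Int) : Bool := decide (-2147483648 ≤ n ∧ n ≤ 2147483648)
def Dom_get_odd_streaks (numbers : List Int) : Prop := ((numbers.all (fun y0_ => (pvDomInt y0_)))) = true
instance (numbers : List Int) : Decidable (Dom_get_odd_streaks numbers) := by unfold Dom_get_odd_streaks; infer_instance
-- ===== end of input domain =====

-- B replaces A's streak-counter state machine (list of streak lengths + final max) by a
-- run-scanning loop that measures each maximal odd run directly and keeps a running maximum.

-- ===== PORT A =====
-- the for-loop of A: state (streaks, current_streak), plus the final flush of current_streak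
def aGo : List Int → List Int → Int → List Int
  | [], streaks, cur => if cur > 0 then streaks ++ [cur] else streaks
  | n :: ns, streaks, cur =>
    if PySem.Int.mod n 2 = 1 then aGo ns streaks (cur + 1)
    else if cur > 0 then aGo ns (streaks ++ [cur]) 0
    else aGo ns streaks cur

def get_odd_streaks (numbers : List Int) : Int :=
  let streaks := aGo numbers [] 0
  if streaks.isEmpty then 0
  else (PySem.List.max? streaks (fun x => x)).getD 0

-- ===== PORT B =====
-- inner while loop of B: length of the leading run of odd numbers, and the remaining suffix
def countOdds : List Int → Int × List Int
  | [] => (0, [])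
  | y :: ys =>
    if PySem.Int.mod y 2 = 1 then
      let p := countOdds ys
      (p.1 + 1, p.2)
    else (0, y :: ys)

theorem countOdds_len : ∀ (ys : List Int), (countOdds ys).2.length ≤ ys.length := by
  intro ys
  induction ys with
  | nil => simp [countOdds]
  | cons y ys ih =>
    simp only [countOdds]
    split
    · simpa using Nat.le_succ_of_le ih
    · simp

-- outer while loop of B
def bGo : List Int → Int → Int
  | [], best => best
  | x :: xs, best =>
    if PySem.Int.mod x 2 = 1 then
      let p := countOdds (x :: xs)
      bGo p.2 (max best p.1)
    else bGo xs best
termination_by xs _ => xs.length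
decreasing_by
  · simp only [countOdds, *, if_pos]
    exact Nat.lt_succ_of_le (countOdds_len xs)
  · simp

def get_odd_streaks_alt (numbers : List Int) : Int := bGo numbers 0

-- ===== PRECONDITION & SPEC =====
def Spec_get_odd_streaks (numbers : List Int) (out : Int) : Prop := out = get_odd_streaks_alt numbers
instance (numbers : List Int) (out : Int) : Decidable (Spec_get_odd_streaks numbers out) := by unfold Spec_get_odd_streaks; infer_instance

-- ===== CLAIM (what is proved, stated in full; the proofs are below) =====
def Claim_equal_get_odd_streaks : Prop := ∀ (numbers : List Int), Dom_get_odd_streaks numbers → Spec_get_odd_streaks numbers (get_odd_streaks numbers)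

-- ===== LEMMAS AND PROOFS =====

-- the lengths of the maximal odd runs, given a pending streak count c
def oddLens : Int → List Int → List Int
  | c, [] => if 0 < c then [c] else []
  | c, n :: ns =>
    if PySem.Int.mod n 2 = 1 then oddLens (c + 1) ns
    else (if 0 < c then [c] else []) ++ oddLens 0 ns

theorem aGo_eq_oddLens : ∀ (ns : List Int) (s : List Int) (c : Int), 0 ≤ c →
    aGo ns s c = s ++ oddLens c ns := by
  intro ns
  induction ns with
  | nil =>
    intro s c hc
    simp only [aGo, oddLens]
    split_ifs with h
    · rfl
    · simp
  | cons n ns ih =>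
    intro s c hc
    simp only [aGo, oddLens]
    split_ifs with h h'
    · exact ih s (c + 1) (by omega)
    · rw [ih (s ++ [c]) 0 le_rfl]
      simp
    · have hc0 : c = 0 := by omega
      subst hc0
      rw [ih s 0 le_rfl]
      simp

theorem oddLens_pos : ∀ (ns : List Int) (c m : Int), m ∈ oddLens c ns → 0 < m := by
  intro ns
  induction ns with
  | nil =>
    intro c m hm
    simp only [oddLens] at hm
    split_ifs at hm with h
    · simp at hm; omega
    · simp at hm
  | cons n ns ih =>
    intro c m hm
    simp only [oddLens] at hm
    split_ifs at hm with h h2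
    · exact ih _ _ hm
    · rcases List.mem_append.mp hm with h1 | h2
      · simp at h1; omega
      · exact ih _ _ h2
    · simpa using ih _ _ (by simpa using hm)

theorem countOdds_nonneg : ∀ (ys : List Int), 0 ≤ (countOdds ys).1 := by
  intro ys
  induction ys with
  | nil => simp [countOdds]
  | cons y ys ih =>
    simp only [countOdds]
    split
    · simpa using by omega
    · simp

theorem oddLens_run : ∀ (ys : List Int) (c : Int), 0 < c + (countOdds ys).1 →
    oddLens c ys = (c + (countOdds ys).1) :: oddLens 0 (countOdds ys).2 := by
  intro ys
  induction ys with
  | nil =>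
    intro c hc
    simp only [countOdds] at *
    simp only [oddLens]
    rw [if_pos (by omega)]
    simp
  | cons y ys ih =>
    intro c hc
    simp only [countOdds] at *
    by_cases h : PySem.Int.mod y 2 = 1
    · simp only [h, if_pos, oddLens] at *
      rw [ih (c + 1) (by omega)]
      ring_nf
    · simp only [h, if_false, oddLens] at *
      rw [if_pos (by omega)]
      simp

theorem bGo_eq_foldl : ∀ (xs : List Int) (best : Int),
    bGo xs best = (oddLens 0 xs).foldl max best := by
  intro xs best
  induction xs, best using bGo.induct with
  | case1 best => simp [bGo, oddLens]
  | case2 x xs best h p ih =>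
    rw [bGo, if_pos h]
    have hpos : 0 < (0 : Int) + (countOdds (x :: xs)).1 := by
      have := countOdds_nonneg xs
      simp only [countOdds, h, if_pos]
      omega
    rw [oddLens_run (x :: xs) 0 hpos]
    simp only [List.foldl_cons, zero_add]
    exact ih
  | case3 x xs best h ih =>
    rw [bGo, if_neg h]
    simp only [oddLens, if_neg h]
    simpa using ih

-- ===== VERDICT (by name: the statement is the Claim_ definition above) =====
theorem get_odd_streaks_spec : Claim_equal_get_odd_streaks := by
  unfold Claim_equal_get_odd_streaks
  intro numbers _
  unfold Spec_get_odd_streaks get_odd_streaks get_odd_streaks_alt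
  rw [aGo_eq_oddLens numbers [] 0 le_rfl, bGo_eq_foldl]
  simp only [List.nil_append]
  cases h : oddLens 0 numbers with
  | nil => simp
  | cons m t =>
    rw [PySem.List.max?_id_cons]
    have hm : 0 < m := oddLens_pos numbers 0 m (by rw [h]; simp)
    simp [max_eq_right hm.le]
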